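-- pv_equiv track=rewrite | github.com/homveloper/CoTe | 021_해시_할인행사/solution.py | solution
-- ===== SOURCE A (Python) =====
-- def solution(want, number, discount):
--     result = 0
--
--     want_dict = dict(zip(want, number))
--
--     for i in range(len(discount) - 9):
--
--         # 각 일자별 할인 상품의 수를 카운팅해서 want_dict와 동일하면
--         # 10일 동안 모든 할인 상품을 구매가능함
--
--         discount_dict = {}
--         for j in range(i, i+10):
--             food = discount[j]
--             discount_dict[food] = discount_dict.get(food, 0) + 1
--
--         # 모두 동일하면 조건 만족
--         if want_dict == discount_dict:
--             result += 1
--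
--
--     return result
-- ===== SOURCE B (Python) =====
-- def solution(want, number, discount):
--     # Sliding 10-day window over discount: per step only the leaving and the
--     # entering item are re-examined.  Counts are kept for wanted items only;
--     # `other` counts unwanted items inside the window, `bad` counts wanted items
--     # whose window count differs from the wanted one; a window matches iff
--     # bad == 0 == other.
--     w = dict(zip(want, number))
--     n = len(discount)
--     if n < 10:
--         return 0
--     # a wanted count of 0 can never equal a counted window (window counts are >= 1)
--     if 0 in w.values():
--         return 0
--     cnt = {}
--     cnt_get = cnt.get
--     other = 0
--     bad = len(w)
--     for j in range(10):
--         k = discount[j]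
--         if k in w:
--             c = cnt_get(k, 0)
--             t = w[k]
--             if c == t:
--                 bad += 1
--             c += 1
--             cnt[k] = c
--             if c == t:
--                 bad -= 1
--         else:
--             other += 1
--     result = 1 if bad == 0 == other else 0
--     for i in range(1, n - 9):
--         k = discount[i - 1]
--         if k in w:
--             c = cnt_get(k, 0)
--             t = w[k]
--             if c == t:
--                 bad += 1
--             c -= 1
--             cnt[k] = c
--             if c == t:
--                 bad -= 1
--         else:
--             other -= 1
--         k = discount[i + 9]
--         if k in w:
--             c = cnt_get(k, 0)
--             t = w[k]
--             if c == t: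
--                 bad += 1
--             c += 1
--             cnt[k] = c
--             if c == t:
--                 bad -= 1
--         else:
--             other += 1
--         if bad == 0 == other:
--             result += 1
--     return result
-- ===== Notes on version B (the rewrite author's own statement) =====
-- stated objective: faster
-- what changed: B replaces A's per-window recount-and-whole-dict-compare with a single sliding window that re-examines only the leaving/entering item, keeping counts for wanted items plus an 'other' count and a mismatch counter, so each window costs O(1) instead of O(10+|want|).
import Mathlib
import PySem

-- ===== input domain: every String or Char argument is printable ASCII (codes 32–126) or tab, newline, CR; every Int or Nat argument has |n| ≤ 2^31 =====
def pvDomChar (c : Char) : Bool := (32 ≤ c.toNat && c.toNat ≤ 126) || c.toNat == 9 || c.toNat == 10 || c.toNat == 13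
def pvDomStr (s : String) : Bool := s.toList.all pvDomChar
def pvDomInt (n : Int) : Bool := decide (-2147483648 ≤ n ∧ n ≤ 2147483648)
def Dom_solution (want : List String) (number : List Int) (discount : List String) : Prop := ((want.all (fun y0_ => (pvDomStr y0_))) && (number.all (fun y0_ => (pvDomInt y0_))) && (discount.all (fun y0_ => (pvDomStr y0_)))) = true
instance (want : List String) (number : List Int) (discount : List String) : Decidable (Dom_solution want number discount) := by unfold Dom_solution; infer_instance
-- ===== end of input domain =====

-- B replaces A's per-window recount + whole-dict comparison by one sliding window that
-- re-examines only the leaving/entering item, keeping counts for wanted items, an 'other'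
-- count for unwanted items and one mismatch counter (measurably faster, constant factor).

-- ===== PORT A =====
-- Python's `==` on dict[str, int] (order-insensitive): same key set and the same value at every key.
def pyDictEqInt (d e : PySem.Dict String Int) : Bool :=
  (d.keys.all (fun k => e.get? k == d.get? k)) && (e.keys.all (fun k => d.contains k))

def solution (want : List String) (number : List Int) (discount : List String) : Int :=
  let wantDict := (want.zip number).foldl (fun d p => d.insert p.1 p.2) PySem.Dict.empty
  (PySem.List.pyRange 0 ((discount.length : Int) - 9)).foldl
    (fun result i =>
      -- discount[j] is always in range here (0 ≤ j < len(discount)), so pyGetD is exact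
      let discountDict :=
        (PySem.List.pyRange i (i + 10)).foldl
          (fun dd j =>
            let food := PySem.List.pyGetD discount j ""
            dd.insert food (dd.getD food 0 + 1))
          PySem.Dict.empty
      if pyDictEqInt wantDict discountDict then result + 1 else result)
    0

-- ===== PORT B =====
-- Source B's repeated update block as a helper: state is (cnt, other, bad); adjust the window
-- count of item k by delta.  w[k] is read with getD, exact because it is guarded by `k in w`.
def updB (w : PySem.Dict String Int) (st : PySem.Dict String Int × Int × Int) (k : String)
    (delta : Int) : PySem.Dict String Int × Int × Int :=
  if w.contains k then
    let c := st.1.getD k 0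
    let t := w.getD k 0
    let bad1 := if c == t then st.2.2 + 1 else st.2.2
    let c' := c + delta
    let cnt1 := st.1.insert k c'
    let bad2 := if c' == t then bad1 - 1 else bad1
    (cnt1, st.2.1, bad2)
  else
    (st.1, st.2.1 + delta, st.2.2)

def solution_alt (want : List String) (number : List Int) (discount : List String) : Int :=
  let w := (want.zip number).foldl (fun d p => d.insert p.1 p.2) PySem.Dict.empty
  let n : Int := (discount.length : Int)
  if n < 10 then 0
  else if w.values.contains (0 : Int) then 0
  else
    -- discount[j] always in range below, so pyGetD is exact
    let st0 := (PySem.List.pyRange 0 10).foldl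
      (fun st j => updB w st (PySem.List.pyGetD discount j "") 1)
      (PySem.Dict.empty, 0, (w.size : Int))
    let res0 : Int := if st0.2.2 == 0 && st0.2.1 == 0 then 1 else 0
    let fin := (PySem.List.pyRange 1 (n - 9)).foldl
      (fun p i =>
        let st := updB w (updB w p.1 (PySem.List.pyGetD discount (i - 1) "") (-1))
                       (PySem.List.pyGetD discount (i + 9) "") 1
        (st, if st.2.2 == 0 && st.2.1 == 0 then p.2 + 1 else p.2))
      (st0, res0)
    fin.2

-- ===== PRECONDITION & SPEC =====
def Spec_solution (want : List String) (number : List Int) (discount : List String) (out : Int) : Prop := out = solution_alt want number discount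
instance (want : List String) (number : List Int) (discount : List String) (out : Int) : Decidable (Spec_solution want number discount out) := by unfold Spec_solution; infer_instance

-- ===== CLAIM (what is proved, stated in full; the proofs are below) =====
def Claim_equal_solution : Prop := ∀ (want : List String) (number : List Int) (discount : List String), Dom_solution want number discount → Spec_solution want number discount (solution want number discount)

-- ===== LEMMAS AND PROOFS =====

-- proof-side helpers
def winL (d : List String) (i : Nat) : List String := (d.drop i).take 10

def cdict (l : List String) : PySem.Dict String Int :=
  l.foldl (fun d f => d.insert f (d.getD f 0 + 1)) PySem.Dict.empty

-- number of wanted keys whose window count differs from the wanted count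
def badSpec (W c : PySem.Dict String Int) : Int :=
  ((W.keys.countP (fun k => !(c.getD k 0 == W.getD k 0))) : Int)

-- one update step, written out: the new counter dict and the new 'other' value
def CFa (W c : PySem.Dict String Int) (k : String) (δ : Int) : PySem.Dict String Int :=
  if W.contains k then c.insert k (c.getD k 0 + δ) else c

def Oa (W : PySem.Dict String Int) (o : Int) (k : String) (δ : Int) : Int :=
  if W.contains k then o else o + δ

def CF1 (W : PySem.Dict String Int) (l : List String) (c : PySem.Dict String Int) :
    PySem.Dict String Int :=
  l.foldl (fun d k => CFa W d k 1) c

lemma pyRange_nil (a b : Int) (h : b ≤ a) : PySem.List.pyRange a b = [] := by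
  apply List.eq_nil_iff_forall_not_mem.mpr
  intro x hx
  rw [PySem.List.mem_pyRange_one] at hx
  omega

lemma pyRange_cast (s m : Nat) :
    PySem.List.pyRange (s : Int) ((s : Int) + (m : Int)) =
      (List.range' s m).map (fun (j : Nat) => (j : Int)) := by
  induction m with
  | zero =>
    rw [List.range'_zero, List.map_nil]
    exact pyRange_nil _ _ (by omega)
  | succ m ih =>
    have h1 : (s : Int) + ((m + 1 : Nat) : Int) = ((s : Int) + (m : Int)) + 1 := by push_cast; ring
    rw [h1, PySem.List.pyRange_one_succ_right (by omega : (s : Int) ≤ (s : Int) + (m : Int)), ih,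
      List.range'_concat, List.map_append]
    simp

lemma pyRange_zero_cast (m : Nat) :
    PySem.List.pyRange 0 ((m : Nat) : Int) = (List.range m).map (fun (j : Nat) => (j : Int)) := by
  have h := pyRange_cast 0 m
  simpa [List.range_eq_range'] using h

lemma get?_eq_some_getD (c : PySem.Dict String Int) (k : String) (h : c.contains k = true) :
    c.get? k = some (c.getD k 0) := by
  have hs := PySem.Dict.contains_eq_isSome_get? c k
  rw [h] at hs
  cases hg : c.get? k with
  | none => rw [hg] at hs; simp at hs
  | some v => rw [PySem.Dict.getD_eq_get?_getD, hg]; rfl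

lemma countP_update (l : List String) (hl : l.Nodup) (p q : String → Bool) (k : String)
    (hpq : ∀ x ∈ l, x ≠ k → p x = q x) (hk : k ∈ l) :
    (l.countP q : Int) =
      (l.countP p : Int) + (if q k then 1 else 0) - (if p k then 1 else 0) := by
  obtain ⟨l1, l2, rfl⟩ := List.append_of_mem hk
  rw [List.nodup_append] at hl
  obtain ⟨h1, h2, hdisj⟩ := hl
  have hk1 : k ∉ l1 := fun h => (hdisj k h k (by simp)) rfl
  have hk2 : k ∉ l2 := (List.nodup_cons.mp h2).1
  have e1 : l1.countP p = l1.countP q := by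
    apply List.countP_congr
    intro x hx
    rw [hpq x (by simp [hx]) (fun h => hk1 (h ▸ hx))]
  have e2 : l2.countP p = l2.countP q := by
    apply List.countP_congr
    intro x hx
    rw [hpq x (by simp [hx]) (fun h => hk2 (h ▸ hx))]
  simp only [List.countP_append, List.countP_cons, e1, e2]
  push_cast
  split_ifs <;> omega

lemma badSpec_insert (W c : PySem.Dict String Int) (hW : W.keys.Nodup)
    (k : String) (hk : W.contains k = true) (v : Int) :
    badSpec W (c.insert k v) =
      badSpec W c + (if c.getD k 0 == W.getD k 0 then 1 else 0)
        - (if (c.insert k v).getD k 0 == W.getD k 0 then 1 else 0) := by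
  have hkk : k ∈ W.keys := (PySem.Dict.contains_iff_mem_keys W k).mp hk
  unfold badSpec
  have hcu := countP_update W.keys hW
    (fun x => !(c.getD x 0 == W.getD x 0))
    (fun x => !((c.insert k v).getD x 0 == W.getD x 0)) k
    (fun x _ hx => by simp [PySem.Dict.getD_insert_of_ne c v 0 hx]) hkk
  rw [hcu]
  have hins : (c.insert k v).getD k 0 = v := PySem.Dict.getD_insert_self c k v 0
  simp only [hins]
  by_cases h1 : c.getD k 0 = W.getD k 0 <;> by_cases h2 : v = W.getD k 0 <;>
    simp [h1, h2] <;> omega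

lemma updB_spec (W c : PySem.Dict String Int) (o : Int) (k : String) (δ : Int)
    (hW : W.keys.Nodup) :
    updB W (c, o, badSpec W c) k δ = (CFa W c k δ, Oa W o k δ, badSpec W (CFa W c k δ)) := by
  unfold updB CFa Oa
  by_cases hk : W.contains k = true
  · simp only [hk, if_true]
    refine Prod.ext rfl (Prod.ext rfl ?_)
    simp only
    rw [badSpec_insert W c hW k hk (c.getD k 0 + δ),
      PySem.Dict.getD_insert_self c k (c.getD k 0 + δ) 0]
    split_ifs <;> ring
  · have hk' : W.contains k = false := by
      cases h : W.contains k
      · rfl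
      · exact absurd h hk
    simp [hk']

lemma CFa_getD (W c : PySem.Dict String Int) (k : String) (δ : Int) (x : String)
    (hx : W.contains x = true) :
    (CFa W c k δ).getD x 0 = c.getD x 0 + (if x = k then δ else 0) := by
  unfold CFa
  by_cases hk : W.contains k = true
  · rw [if_pos hk, PySem.Dict.getD_insert]
    split_ifs with h
    · subst h; ring
    · ring
  · rw [if_neg hk]
    have hxk : ¬ x = k := fun h => hk (h ▸ hx)
    rw [if_neg hxk]
    ring

lemma Oa_eq (W : PySem.Dict String Int) (o : Int) (k : String) (δ : Int) :
    Oa W o k δ = o + (if W.contains k then 0 else δ) := by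
  unfold Oa
  split_ifs <;> ring

lemma badSpec_zero_iff (W c : PySem.Dict String Int) :
    badSpec W c = 0 ↔ ∀ k ∈ W.keys, c.getD k 0 = W.getD k 0 := by
  unfold badSpec
  rw [Nat.cast_eq_zero, List.countP_eq_zero]
  constructor
  · intro h k hk
    have := h k hk
    simpa using this
  · intro h k hk
    simp [h k hk]

lemma getD_ne_zero_of_mem_keys (W : PySem.Dict String Int) (hW : W.keys.Nodup)
    (h0 : (0 : Int) ∉ W.values) (k : String) (hk : k ∈ W.keys) : W.getD k 0 ≠ 0 := by
  intro h
  exact h0 (by rw [PySem.Dict.values_eq_map_keys W hW 0]; exact List.mem_map.mpr ⟨k, hk, h⟩)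

lemma badSpec_empty (W : PySem.Dict String Int) (hW : W.keys.Nodup)
    (h0 : (0 : Int) ∉ W.values) :
    badSpec W PySem.Dict.empty = (W.keys.length : Int) := by
  unfold badSpec
  congr 1
  rw [List.countP_eq_length]
  intro k hk
  simp [PySem.Dict.getD_empty]
  exact fun h => getD_ne_zero_of_mem_keys W hW h0 k hk h.symm

-- cdict facts
lemma cdict_getD (l : List String) (k : String) :
    (cdict l).getD k 0 = (l.count k : Int) := by
  unfold cdict
  rw [PySem.Dict.getD_foldl_insert_add_one l PySem.Dict.empty k]
  simp [PySem.Dict.getD_empty]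

lemma cdict_contains (l : List String) (k : String) :
    (cdict l).contains k = true ↔ k ∈ l := by
  rw [PySem.Dict.contains_iff_mem_keys]
  unfold cdict
  rw [PySem.Dict.keys_foldl_insert l _ PySem.Dict.empty]
  simp only [PySem.Dict.keys_empty, PySem.Set.update_nil_left]
  exact PySem.Set.mem_ofList l k

lemma cdict_get?_mem (l : List String) (k : String) (hk : k ∈ l) :
    (cdict l).get? k = some ((l.count k : Int)) := by
  rw [get?_eq_some_getD (cdict l) k ((cdict_contains l k).mpr hk), cdict_getD]

lemma cdict_get?_not_mem (l : List String) (k : String) (hk : k ∉ l) :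
    (cdict l).get? k = none := by
  rw [PySem.Dict.get?_eq_none_iff_contains]
  cases h : (cdict l).contains k
  · rfl
  · exact absurd ((cdict_contains l k).mp h) hk

lemma pyDictEqInt_true_iff (d e : PySem.Dict String Int) :
    pyDictEqInt d e = true ↔
      ((∀ k ∈ d.keys, e.get? k = d.get? k) ∧ ∀ k ∈ e.keys, d.contains k = true) := by
  simp [pyDictEqInt, List.all_eq_true]

lemma chk_iff (W : PySem.Dict String Int) (l : List String) (hW : W.keys.Nodup)
    (h0 : (0 : Int) ∉ W.values) :
    pyDictEqInt W (cdict l) = true ↔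
      ((∀ k ∈ W.keys, (l.count k : Int) = W.getD k 0) ∧
        l.countP (fun x => !(W.contains x)) = 0) := by
  rw [pyDictEqInt_true_iff]
  constructor
  · rintro ⟨h1, h2⟩
    constructor
    · intro k hk
      have hWc : W.contains k = true := (PySem.Dict.contains_iff_mem_keys W k).mpr hk
      have hg := h1 k hk
      rw [get?_eq_some_getD W k hWc] at hg
      by_cases hkl : k ∈ l
      · rw [cdict_get?_mem l k hkl] at hg
        exact Option.some.inj hg
      · rw [cdict_get?_not_mem l k hkl] at hg
        exact absurd hg (by simp)
    · rw [List.countP_eq_zero]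
      intro x hx
      have hmem : x ∈ (cdict l).keys :=
        (PySem.Dict.contains_iff_mem_keys (cdict l) x).mp ((cdict_contains l x).mpr hx)
      simp [h2 x hmem]
  · rintro ⟨h1, h2⟩
    constructor
    · intro k hk
      have hWc : W.contains k = true := (PySem.Dict.contains_iff_mem_keys W k).mpr hk
      have hne := getD_ne_zero_of_mem_keys W hW h0 k hk
      have hkl : k ∈ l := by
        by_contra hkl
        have h' := h1 k hk
        rw [List.count_eq_zero_of_not_mem hkl] at h'
        exact hne (by rw [← h']; simp)
      rw [cdict_get?_mem l k hkl, get?_eq_some_getD W k hWc]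
      exact congrArg some (h1 k hk)
    · intro k hk
      have hkl : k ∈ l := (cdict_contains l k).mp ((PySem.Dict.contains_iff_mem_keys _ k).mpr hk)
      have := List.countP_eq_zero.mp h2 k hkl
      simpa using this

lemma chk_false_of_zero (W : PySem.Dict String Int) (l : List String) (hW : W.keys.Nodup)
    (h0 : (0 : Int) ∈ W.values) : pyDictEqInt W (cdict l) = false := by
  cases hb : pyDictEqInt W (cdict l)
  · rfl
  · exfalso
    obtain ⟨h1, _⟩ := (pyDictEqInt_true_iff W (cdict l)).mp hb
    rw [PySem.Dict.values_eq_map_keys W hW 0] at h0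
    obtain ⟨k, hk, hk0⟩ := List.mem_map.mp h0
    have hg := h1 k hk
    rw [get?_eq_some_getD W k ((PySem.Dict.contains_iff_mem_keys W k).mpr hk), hk0] at hg
    by_cases hkl : k ∈ l
    · rw [cdict_get?_mem l k hkl] at hg
      have hi := Option.some.inj hg
      have hpos : 0 < l.count k := List.count_pos_iff.mpr hkl
      omega
    · rw [cdict_get?_not_mem l k hkl] at hg
      exact absurd hg (by simp)

-- window facts
lemma map_pyRange_window (d : List String) (i : Nat) (h : i + 10 ≤ d.length) :
    (PySem.List.pyRange (i : Int) ((i : Int) + 10)).map (fun j => PySem.List.pyGetD d j "") =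
      winL d i := by
  rw [show ((i : Int) + 10) = (i : Int) + ((10 : Nat) : Int) by norm_num, pyRange_cast i 10,
    List.map_map]
  apply List.ext_getElem
  · simp [winL]
    omega
  · intro j hj hj'
    have hj10 : j < 10 := by simpa using hj
    have hin : i + 1 * j < d.length := by omega
    simp only [List.getElem_map, Function.comp_apply, List.getElem_range']
    rw [PySem.List.pyGetD_natCast d (i + 1 * j) "", List.getD_eq_getElem d "" hin]
    simp only [winL, List.getElem_take, List.getElem_drop]
    congr 1
    omega

lemma winL_cons (d : List String) (i : Nat) (h : i + 11 ≤ d.length) :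
    winL d i = d.getD i "" :: (d.drop (i + 1)).take 9 := by
  have hi : i < d.length := by omega
  unfold winL
  rw [List.drop_eq_getElem_cons hi, List.getD_eq_getElem d "" hi]
  rfl

lemma winL_concat (d : List String) (i : Nat) (h : i + 11 ≤ d.length) :
    winL d (i + 1) = (d.drop (i + 1)).take 9 ++ [d.getD (i + 10) ""] := by
  have hi10 : i + 10 < d.length := by omega
  have hlen9 : 9 < (d.drop (i + 1)).length := by
    rw [List.length_drop]; omega
  unfold winL
  rw [show (10 : Nat) = 9 + 1 by norm_num, List.take_add_one, List.getElem?_drop,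
    show i + 1 + 9 = i + 10 by omega, List.getElem?_eq_getElem hi10,
    List.getD_eq_getElem d "" hi10]
  rfl

lemma winL_succ_count (d : List String) (i : Nat) (h : i + 11 ≤ d.length) (k : String) :
    ((winL d (i + 1)).count k : Int) =
      (winL d i).count k - (if d.getD i "" = k then 1 else 0)
        + (if d.getD (i + 10) "" = k then 1 else 0) := by
  rw [winL_cons d i h, winL_concat d i h]
  simp only [List.count_append, List.count_cons, List.count_nil, beq_iff_eq]
  by_cases hq1 : d.getD i "" = k <;> by_cases hq2 : d.getD (i + 10) "" = k <;>
    simp [hq1, hq2] <;> push_cast <;> ring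

lemma winL_succ_countP (d : List String) (i : Nat) (h : i + 11 ≤ d.length)
    (p : String → Bool) :
    (((winL d (i + 1)).countP p) : Int) =
      ((winL d i).countP p) - (if p (d.getD i "") then 1 else 0)
        + (if p (d.getD (i + 10) "") then 1 else 0) := by
  rw [winL_cons d i h, winL_concat d i h]
  simp only [List.countP_append, List.countP_cons, List.countP_nil]
  by_cases hq1 : p (d.getD i "") = true <;> by_cases hq2 : p (d.getD (i + 10) "") = true <;>
    simp [hq1, hq2] <;> push_cast <;> ring

lemma foldB_one (W : PySem.Dict String Int) (hW : W.keys.Nodup) (l : List String) :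
    ∀ (c : PySem.Dict String Int) (o : Int),
      l.foldl (fun st k => updB W st k 1) (c, o, badSpec W c) =
        (CF1 W l c, o + ((l.countP (fun x => !(W.contains x))) : Int),
         badSpec W (CF1 W l c)) := by
  induction l with
  | nil => intro c o; simp [CF1]
  | cons a t ih =>
    intro c o
    simp only [List.foldl_cons]
    rw [updB_spec W c o a 1 hW, ih (CFa W c a 1) (Oa W o a 1)]
    have hcf : CF1 W (a :: t) c = CF1 W t (CFa W c a 1) := rfl
    rw [hcf]
    refine Prod.ext rfl (Prod.ext ?_ rfl)
    simp only [List.countP_cons, Oa_eq]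
    by_cases ha : W.contains a = true <;> simp [ha] <;> push_cast <;> ring

lemma CF1_getD (W : PySem.Dict String Int) (l : List String) :
    ∀ (c : PySem.Dict String Int) (x : String), W.contains x = true →
      (CF1 W l c).getD x 0 = c.getD x 0 + (l.count x : Int) := by
  induction l with
  | nil => intro c x _; simp [CF1]
  | cons a t ih =>
    intro c x hx
    have hcf : CF1 W (a :: t) c = CF1 W t (CFa W c a 1) := rfl
    rw [hcf, ih (CFa W c a 1) x hx, CFa_getD W c a 1 x hx]
    rcases eq_or_ne x a with h | h
    · subst h
      simp [List.count_cons]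
      ring
    · have h' : ¬ (a = x) := fun e => h e.symm
      simp [List.count_cons, h, h']

lemma slideB (W : PySem.Dict String Int) (dis : List String) (hW : W.keys.Nodup)
    (h0 : (0 : Int) ∉ W.values) :
    ∀ (m s : Nat) (c : PySem.Dict String Int) (o res : Int),
      1 ≤ s → s + m + 9 = dis.length →
      (∀ k, W.contains k = true → c.getD k 0 = ((winL dis (s - 1)).count k : Int)) →
      o = (((winL dis (s - 1)).countP (fun x => !(W.contains x))) : Int) →
      (((List.range' s m).map (fun (j : Nat) => (j : Int))).foldl
        (fun p i =>
          (updB W (updB W p.1 (PySem.List.pyGetD dis (i - 1) "") (-1))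
             (PySem.List.pyGetD dis (i + 9) "") 1,
           if (updB W (updB W p.1 (PySem.List.pyGetD dis (i - 1) "") (-1))
                (PySem.List.pyGetD dis (i + 9) "") 1).2.2 == 0
              && (updB W (updB W p.1 (PySem.List.pyGetD dis (i - 1) "") (-1))
                (PySem.List.pyGetD dis (i + 9) "") 1).2.1 == 0
           then p.2 + 1 else p.2))
        ((c, o, badSpec W c), res)).2
      = res + ((List.range' s m).countP (fun i => pyDictEqInt W (cdict (winL dis i))) : Int) := by
  intro m
  induction m with
  | zero => intro s c o res _ _ _ _; simp
  | succ m ih =>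
    intro s c o res hs hlen hcount hother
    rw [List.range'_succ]
    simp only [List.map_cons, List.foldl_cons]
    have hs1 : ((s : Int) - 1) = ((s - 1 : Nat) : Int) := by omega
    have hs9 : ((s : Int) + 9) = ((s + 9 : Nat) : Int) := by omega
    rw [hs1, hs9, PySem.List.pyGetD_natCast dis (s - 1) "", PySem.List.pyGetD_natCast dis (s + 9) ""]
    set k1 := dis.getD (s - 1) "" with hk1
    set k2 := dis.getD (s + 9) "" with hk2
    rw [updB_spec W c o k1 (-1) hW]
    rw [updB_spec W (CFa W c k1 (-1)) (Oa W o k1 (-1)) k2 1 hW]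
    set c2 := CFa W (CFa W c k1 (-1)) k2 1 with hc2
    set o2 := Oa W (Oa W o k1 (-1)) k2 1 with ho2
    have hwin : s - 1 + 11 ≤ dis.length := by omega
    have hcount2 : ∀ x, W.contains x = true → c2.getD x 0 = ((winL dis s).count x : Int) := by
      intro x hx
      have hstep := winL_succ_count dis (s - 1) hwin x
      rw [show s - 1 + 1 = s by omega, show s - 1 + 10 = s + 9 by omega, ← hk1, ← hk2] at hstep
      simp only [@eq_comm _ k1 x, @eq_comm _ k2 x] at hstep
      rw [hc2, CFa_getD W (CFa W c k1 (-1)) k2 1 x hx, CFa_getD W c k1 (-1) x hx,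
        hcount x hx, hstep]
      split_ifs <;> ring
    have hother2 : o2 = (((winL dis s).countP (fun x => !(W.contains x))) : Int) := by
      have hstep := winL_succ_countP dis (s - 1) hwin (fun x => !(W.contains x))
      rw [show s - 1 + 1 = s by omega, show s - 1 + 10 = s + 9 by omega, ← hk1, ← hk2] at hstep
      rw [ho2, Oa_eq, Oa_eq, hother, hstep]
      by_cases hq1 : W.contains k1 = true <;> by_cases hq2 : W.contains k2 = true <;>
        simp [hq1, hq2] <;> ring
    have hiff : (badSpec W c2 = 0 ∧ o2 = 0) ↔ pyDictEqInt W (cdict (winL dis s)) = true := by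
      rw [chk_iff W (winL dis s) hW h0, badSpec_zero_iff]
      constructor
      · rintro ⟨hb, ho⟩
        constructor
        · intro k hk
          have hc := (PySem.Dict.contains_iff_mem_keys W k).mpr hk
          rw [← hcount2 k hc, hb k hk]
        · rw [hother2] at ho
          exact_mod_cast ho
      · rintro ⟨h1, h2⟩
        constructor
        · intro k hk
          have hc := (PySem.Dict.contains_iff_mem_keys W k).mpr hk
          rw [hcount2 k hc, h1 k hk]
        · rw [hother2, h2]
          simp
    have hbad : ((badSpec W c2 == (0 : Int)) && (o2 == (0 : Int)))
        = pyDictEqInt W (cdict (winL dis s)) := by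
      cases hp : pyDictEqInt W (cdict (winL dis s))
      · have hne : ¬ (badSpec W c2 = 0 ∧ o2 = 0) := fun h => by
          rw [hiff.mp h] at hp
          exact Bool.false_ne_true hp.symm
        rw [Bool.eq_false_iff]
        intro hcon
        rw [Bool.and_eq_true, beq_iff_eq, beq_iff_eq] at hcon
        exact hne hcon
      · rw [Bool.and_eq_true, beq_iff_eq, beq_iff_eq]
        exact hiff.mpr hp
    rw [hbad]
    have hres := ih (s + 1) c2 o2 (if pyDictEqInt W (cdict (winL dis s)) = true then res + 1 else res)
      (by omega) (by omega) (by intro k hk; simpa using hcount2 k hk) (by simpa using hother2)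
    simp only [List.countP_cons]
    by_cases hp : pyDictEqInt W (cdict (winL dis s)) = true
    · rw [if_pos hp] at hres
      rw [if_pos hp, if_pos hp, hres]
      push_cast
      ring
    · rw [if_neg hp] at hres
      rw [if_neg hp, if_neg hp, hres]
      push_cast
      ring

lemma size_eq_keys_length (d : PySem.Dict String Int) : (d.size : Int) = (d.keys.length : Int) := by
  simp [PySem.Dict.size, PySem.Dict.keys]

-- ===== VERDICT proof =====
theorem solution_spec : Claim_equal_solution := by
  intro want number discount _
  unfold Spec_solution solution solution_alt
  set W := (want.zip number).foldl (fun d p => d.insert p.1 p.2) PySem.Dict.empty with hWdef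
  have hWn : W.keys.Nodup := by
    rw [hWdef]
    exact PySem.Dict.nodup_keys_foldl_insert_key (want.zip number) Prod.fst (fun _ p => p.2)
      PySem.Dict.empty (by simp [PySem.Dict.keys_empty])
  set N := discount.length with hN
  by_cases hlen : (N : Int) < 10
  · rw [if_pos hlen, pyRange_nil 0 ((N : Int) - 9) (by omega)]
    rfl
  · rw [if_neg hlen]
    have h10 : 10 ≤ N := by omega
    -- A's result as a countP over windows
    have hA : (PySem.List.pyRange 0 ((N : Int) - 9)).foldl
        (fun result i =>
          if pyDictEqInt W
              ((PySem.List.pyRange i (i + 10)).foldl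
                (fun dd j =>
                  dd.insert (PySem.List.pyGetD discount j "")
                    (dd.getD (PySem.List.pyGetD discount j "") 0 + 1))
                PySem.Dict.empty)
          then result + 1 else result) 0
        = (((List.range (N - 9)).countP
            (fun i => pyDictEqInt W (cdict (winL discount i)))) : Int) := by
      rw [show ((N : Int) - 9) = ((N - 9 : Nat) : Int) by push_cast; omega,
        pyRange_zero_cast (N - 9)]
      have hfA : ((List.range (N - 9)).map (fun (k : Nat) => (k : Int))).foldl
          (fun (result : Int) i =>
            if pyDictEqInt W
                ((PySem.List.pyRange i (i + 10)).foldl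
                  (fun dd j =>
                    dd.insert (PySem.List.pyGetD discount j "")
                      (dd.getD (PySem.List.pyGetD discount j "") 0 + 1))
                  PySem.Dict.empty)
            then result + 1 else result) (0 : Int)
          = (List.range (N - 9)).foldl
            (fun (result : Int) i' =>
              if pyDictEqInt W
                  ((PySem.List.pyRange ((i' : Nat) : Int) (((i' : Nat) : Int) + 10)).foldl
                    (fun dd j =>
                      dd.insert (PySem.List.pyGetD discount j "")
                        (dd.getD (PySem.List.pyGetD discount j "") 0 + 1))
                    PySem.Dict.empty)
              then result + 1 else result) (0 : Int) :=
        List.foldl_map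
      refine hfA.trans ?_
      rw [PySem.List.foldl_congr_mem (List.range (N - 9)) _
        (fun result i' => if pyDictEqInt W (cdict (winL discount i')) then result + 1 else result)
        0 ?_]
      · rw [PySem.List.foldl_count_if, zero_add]
      · intro acc i' hi'
        have hwin : i' + 10 ≤ N := by
          have := List.mem_range.mp hi'
          omega
        have hX : (PySem.List.pyRange ((i' : Nat) : Int) (((i' : Nat) : Int) + 10)).foldl
            (fun dd j =>
              dd.insert (PySem.List.pyGetD discount j "")
                (dd.getD (PySem.List.pyGetD discount j "") 0 + 1))
            PySem.Dict.empty
            = cdict (winL discount i') :=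
          ((List.foldl_map (f := fun (j : Int) => PySem.List.pyGetD discount j "")
            (g := fun (dd : PySem.Dict String Int) (f : String) =>
              dd.insert f (dd.getD f 0 + 1))
            (l := PySem.List.pyRange ((i' : Nat) : Int) (((i' : Nat) : Int) + 10))
            (init := PySem.Dict.empty)).symm).trans
            (congrArg
              (fun l' => List.foldl
                (fun (dd : PySem.Dict String Int) (f : String) => dd.insert f (dd.getD f 0 + 1))
                PySem.Dict.empty l')
              (map_pyRange_window discount i' hwin))
        exact congrArg (fun b => if b then acc + 1 else acc) (congrArg (pyDictEqInt W) hX)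
    rw [hA]
    by_cases hz : (0 : Int) ∈ W.values
    · have hzc : W.values.contains (0 : Int) = true := by simpa using hz
      rw [if_pos hzc]
      have hcz : (List.range (N - 9)).countP (fun i => pyDictEqInt W (cdict (winL discount i))) = 0 := by
        rw [List.countP_eq_zero]
        intro i _
        rw [chk_false_of_zero W (winL discount i) hWn hz]
        simp
      rw [hcz]
      rfl
    · have hznc : ¬ W.values.contains (0 : Int) = true := by simpa using hz
      rw [if_neg hznc]
      -- initial window
      have hsz : ((W.size : Nat) : Int) = badSpec W PySem.Dict.empty := by
        rw [badSpec_empty W hWn hz, size_eq_keys_length]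
      rw [hsz]
      have hm0 := map_pyRange_window discount 0 (by omega)
      simp only [Nat.cast_zero, zero_add] at hm0
      have hfm0 : (PySem.List.pyRange 0 10).foldl
          (fun st j => updB W st (PySem.List.pyGetD discount j "") 1)
          (PySem.Dict.empty, 0, badSpec W PySem.Dict.empty)
          = ((PySem.List.pyRange 0 10).map (fun j => PySem.List.pyGetD discount j "")).foldl
            (fun st (k : String) => updB W st k 1)
            (PySem.Dict.empty, 0, badSpec W PySem.Dict.empty) :=
        (List.foldl_map (f := fun (j : Int) => PySem.List.pyGetD discount j "")
          (g := fun st (k : String) => updB W st k 1) (l := PySem.List.pyRange 0 10)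
          (init := (PySem.Dict.empty, 0, badSpec W PySem.Dict.empty))).symm
      have hinit : (PySem.List.pyRange 0 10).foldl
          (fun st j => updB W st (PySem.List.pyGetD discount j "") 1)
          (PySem.Dict.empty, 0, badSpec W PySem.Dict.empty)
          = (CF1 W (winL discount 0) PySem.Dict.empty,
             0 + (((winL discount 0).countP (fun x => !(W.contains x))) : Int),
             badSpec W (CF1 W (winL discount 0) PySem.Dict.empty)) := by
        rw [hfm0, hm0, foldB_one W hWn (winL discount 0) PySem.Dict.empty 0]
      rw [hinit]
      dsimp only
      have hcount0 : ∀ x, W.contains x = true →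
          (CF1 W (winL discount 0) PySem.Dict.empty).getD x 0 =
            (((winL discount 0).count x) : Int) := by
        intro x hx
        rw [CF1_getD W (winL discount 0) PySem.Dict.empty x hx, PySem.Dict.getD_empty]
        ring
      have hiff0 : (badSpec W (CF1 W (winL discount 0) PySem.Dict.empty) = 0 ∧
          0 + (((winL discount 0).countP (fun x => !(W.contains x))) : Int) = 0) ↔
          pyDictEqInt W (cdict (winL discount 0)) = true := by
        rw [chk_iff W (winL discount 0) hWn hz, badSpec_zero_iff]
        constructor
        · rintro ⟨hb, ho⟩
          constructor
          · intro k hk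
            have hc := (PySem.Dict.contains_iff_mem_keys W k).mpr hk
            rw [← hcount0 k hc, hb k hk]
          · rw [zero_add] at ho
            exact_mod_cast ho
        · rintro ⟨h1, h2⟩
          constructor
          · intro k hk
            have hc := (PySem.Dict.contains_iff_mem_keys W k).mpr hk
            rw [hcount0 k hc, h1 k hk]
          · rw [h2]
            simp
      have hbad0 : ((badSpec W (CF1 W (winL discount 0) PySem.Dict.empty) == (0 : Int)) &&
          ((0 + (((winL discount 0).countP (fun x => !(W.contains x))) : Int)) == (0 : Int)))
          = pyDictEqInt W (cdict (winL discount 0)) := by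
        cases hp : pyDictEqInt W (cdict (winL discount 0))
        · have hne := fun h => by
            rw [hiff0.mp h] at hp
            exact Bool.false_ne_true hp.symm
          rw [Bool.eq_false_iff]
          intro hcon
          rw [Bool.and_eq_true, beq_iff_eq, beq_iff_eq] at hcon
          exact hne hcon
        · rw [Bool.and_eq_true, beq_iff_eq, beq_iff_eq]
          exact hiff0.mpr hp
      -- the sliding part
      have hrange : PySem.List.pyRange 1 ((N : Int) - 9) =
          (List.range' 1 (N - 10)).map (fun (j : Nat) => (j : Int)) := by
        have h1 := pyRange_cast 1 (N - 10)
        rw [show ((1 : Nat) : Int) + ((N - 10 : Nat) : Int) = (N : Int) - 9 by push_cast; omega] at h1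
        rw [show ((1 : Nat) : Int) = (1 : Int) by norm_num] at h1
        exact h1
      rw [hrange]
      have hslide := slideB W discount hWn hz (N - 10) 1
        (CF1 W (winL discount 0) PySem.Dict.empty)
        (0 + (((winL discount 0).countP (fun x => !(W.contains x))) : Int))
        (if (badSpec W (CF1 W (winL discount 0) PySem.Dict.empty) == (0 : Int)) &&
            ((0 + (((winL discount 0).countP (fun x => !(W.contains x))) : Int)) == (0 : Int))
         then (1 : Int) else 0)
        (by omega) (by omega)
        (by intro k hk; simpa using hcount0 k hk)
        (by rw [zero_add])
      rw [hslide]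
      rw [hbad0]
      rw [List.range_eq_range', show N - 9 = (N - 10) + 1 by omega, List.range'_succ,
        List.countP_cons]
      by_cases hp : pyDictEqInt W (cdict (winL discount 0)) = true
      · rw [if_pos hp, if_pos hp]
        push_cast
        ring
      · rw [if_neg hp, if_neg hp]
        push_cast
        ring
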